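-- pv_equiv track=rewrite | github.com/pedrocarlo/leetcode | src/citadel/maximize_lottery_id.py | maximizeLotteryID
-- ===== SOURCE A (Python) =====
-- def maximizeLotteryID(lotteryID: str, winnerID: str, k: int) -> int:
--     # Convert to lowercase for case-insensitive comparison
--     m, n = len(lotteryID), len(winnerID)
--
--     # Initialize a 3D DP array:
--     # dp[i][j][r] = maximum LCS between lotteryID[0...i-1] and winnerID[0...j-1]
--     # with at most r operations remaining
--     dp = [[[0 for _ in range(k + 1)] for _ in range(n + 1)] for _ in range(m + 1)]
--
--     # Fill the DP array
--     for i in range(1, m + 1):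
--         for j in range(1, n + 1):
--             for r in range(k + 1):  # r = remaining operations
--                 # Option 1: Skip current characters
--                 dp[i][j][r] = max(dp[i - 1][j][r], dp[i][j - 1][r])
--
--                 # Option 2: Characters match naturally - include in LCS
--                 if lotteryID[i - 1] == winnerID[j - 1]:
--                     dp[i][j][r] = max(dp[i][j][r], dp[i - 1][j - 1][r] + 1)
--
--                 # Option 3: Use an operation to modify lotteryID[i-1]
--                 if r > 0:
--                     # Check if we can change lotteryID[i-1] to match winnerID[j-1] in one step
--                     lottery_char = ord(lotteryID[i - 1].lower())
--                     winner_char = ord(winnerID[j - 1].lower())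
--
--                     # Check if characters are within the a-z range
--                     if (
--                         "a" <= lotteryID[i - 1].lower() <= "z"
--                         and "a" <= winnerID[j - 1].lower() <= "z"
--                     ):
--                         # Check if we can transform with one operation (next or previous)
--                         diff = (winner_char - lottery_char) % 26
--                         if (
--                             diff == 1 or diff == 25
--                         ):  # next (1) or previous (25 or -1 in modular arithmetic)
--                             dp[i][j][r] = max(
--                                 dp[i][j][r], dp[i - 1][j - 1][r - 1] + 1
--                             )
--
--     return dp[m][n][k]
-- ===== SOURCE B (Python) =====
-- def maximizeLotteryID(lotteryID: str, winnerID: str, k: int) -> int: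
--     # Top-down memoized recursion on (prefix length i, prefix length j, ops left r).
--     memo = {}
--
--     def solve(i, j, r):
--         if i == 0 or j == 0:
--             return 0
--         key = (i, j, r)
--         if key in memo:
--             return memo[key]
--         best = max(solve(i - 1, j, r), solve(i, j - 1, r))
--         if lotteryID[i - 1] == winnerID[j - 1]:
--             best = max(best, solve(i - 1, j - 1, r) + 1)
--         if r > 0:
--             a = lotteryID[i - 1].lower()
--             b = winnerID[j - 1].lower()
--             if "a" <= a <= "z" and "a" <= b <= "z":
--                 diff = (ord(b) - ord(a)) % 26
--                 if diff == 1 or diff == 25: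
--                     best = max(best, solve(i - 1, j - 1, r - 1) + 1)
--         memo[key] = best
--         return best
--
--     return solve(len(lotteryID), len(winnerID), k)
-- ===== Notes on version B (the rewrite author's own statement) =====
-- stated objective: alternative
-- what changed: Replaces the bottom-up 3D DP table with top-down memoized recursion on (i, j, ops-left) that computes only the demanded states.
import Mathlib
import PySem

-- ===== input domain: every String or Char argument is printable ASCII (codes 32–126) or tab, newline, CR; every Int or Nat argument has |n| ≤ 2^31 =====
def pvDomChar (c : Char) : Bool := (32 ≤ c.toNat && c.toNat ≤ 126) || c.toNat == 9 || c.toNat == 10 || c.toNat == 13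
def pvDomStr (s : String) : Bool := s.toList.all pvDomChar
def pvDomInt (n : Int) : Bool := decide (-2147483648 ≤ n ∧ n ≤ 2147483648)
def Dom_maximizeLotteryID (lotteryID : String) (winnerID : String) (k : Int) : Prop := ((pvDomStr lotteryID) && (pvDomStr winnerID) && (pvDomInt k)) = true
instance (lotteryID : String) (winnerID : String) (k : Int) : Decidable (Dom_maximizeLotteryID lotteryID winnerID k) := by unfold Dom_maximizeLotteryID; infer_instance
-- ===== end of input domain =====

-- B replaces A's bottom-up 3D DP table with top-down memoized recursion on (i, j, ops-left)
-- (the memo cache in Source B is value-transparent; its Lean port is the same recursion without the cache).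

-- ===== PORT A =====
-- shared one-step-shift test: both Pythons contain this identical inline check
def pvCanShift (c d : Char) : Bool :=
  let c' := PySem.Chars.lowerChar c
  let d' := PySem.Chars.lowerChar d
  ('a' ≤ c' && c' ≤ 'z') && ('a' ≤ d' && d' ≤ 'z') &&
    (PySem.Int.mod ((d'.toNat : Int) - (c'.toNat : Int)) 26 == 1 ||
     PySem.Int.mod ((d'.toNat : Int) - (c'.toNat : Int)) 26 == 25)

-- dp[i][j][r] read / write (Python's 3-level list indexing and assignment)
def pvGet3 (dp : List (List (List Int))) (i j r : Nat) : Int :=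
  ((dp.getD i []).getD j []).getD r 0

def pvSet3 (dp : List (List (List Int))) (i j r : Nat) (v : Int) :
    List (List (List Int)) :=
  dp.set i ((dp.getD i []).set j (((dp.getD i []).getD j []).set r v))

-- innermost loop body of A (the three dp[i][j][r] assignments, in Python's order)
def pvBodyR (xs ys : List Char) (i j : Nat) (dp : List (List (List Int))) (r : Nat) :
    List (List (List Int)) :=
  let dp := pvSet3 dp i j r (max (pvGet3 dp (i-1) j r) (pvGet3 dp i (j-1) r))
  let dp := if xs.getD (i-1) ' ' == ys.getD (j-1) ' ' then
      pvSet3 dp i j r (max (pvGet3 dp i j r) (pvGet3 dp (i-1) (j-1) r + 1))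
    else dp
  if decide (0 < r) && pvCanShift (xs.getD (i-1) ' ') (ys.getD (j-1) ' ') then
    pvSet3 dp i j r (max (pvGet3 dp i j r) (pvGet3 dp (i-1) (j-1) (r-1) + 1))
  else dp

def pvBodyJ (xs ys : List Char) (kk : Nat) (i : Nat) (dp : List (List (List Int))) (j : Nat) :
    List (List (List Int)) :=
  (List.range kk).foldl (pvBodyR xs ys i j) dp

def pvBodyI (xs ys : List Char) (kk n : Nat) (dp : List (List (List Int))) (i : Nat) :
    List (List (List Int)) :=
  (List.range' 1 n).foldl (pvBodyJ xs ys kk i) dp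

def maximizeLotteryID (lotteryID : String) (winnerID : String) (k : Int) : Int :=
  let xs := lotteryID.toList
  let ys := winnerID.toList
  let kk := (k + 1).toNat     -- number of r values: range(k+1)
  let dp0 := List.replicate (xs.length + 1)
      (List.replicate (ys.length + 1) (List.replicate kk (0 : Int)))
  let dp := (List.range' 1 xs.length).foldl (pvBodyI xs ys kk ys.length) dp0
  pvGet3 dp xs.length ys.length k.toNat   -- dp[m][n][k] (k ≥ 0 by Pre_)

-- ===== PORT B =====
-- Source B's solve(i, j, r); the memo dict only caches these same values
def pvSolve (xs ys : List Char) : Nat → Nat → Nat → Int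
  | 0, _, _ => 0
  | _+1, 0, _ => 0
  | i+1, j+1, r =>
    let best := max (pvSolve xs ys i (j+1) r) (pvSolve xs ys (i+1) j r)
    let best := if xs.getD i ' ' == ys.getD j ' ' then
        max best (pvSolve xs ys i j r + 1)
      else best
    if decide (0 < r) && pvCanShift (xs.getD i ' ') (ys.getD j ' ') then
      max best (pvSolve xs ys i j (r-1) + 1)
    else best
  termination_by i j r => i + j

def maximizeLotteryID_alt (lotteryID : String) (winnerID : String) (k : Int) : Int :=
  pvSolve lotteryID.toList winnerID.toList lotteryID.toList.length winnerID.toList.length k.toNat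

-- ===== PRECONDITION & SPEC =====
-- Pre_ excludes exactly k < 0, on which A raises IndexError (the r-dimension of the table is empty,
-- so the final dp[m][n][k] read fails); B returns the plain LCS there instead.
def Pre_maximizeLotteryID (lotteryID : String) (winnerID : String) (k : Int) : Prop := 0 ≤ k
instance (lotteryID : String) (winnerID : String) (k : Int) : Decidable (Pre_maximizeLotteryID lotteryID winnerID k) := by unfold Pre_maximizeLotteryID; infer_instance

def pvWitness_maximizeLotteryID : String × String × Int := ("ab", "b", 1)

def Spec_maximizeLotteryID (lotteryID : String) (winnerID : String) (k : Int) (out : Int) : Prop := out = maximizeLotteryID_alt lotteryID winnerID k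
instance (lotteryID : String) (winnerID : String) (k : Int) (out : Int) : Decidable (Spec_maximizeLotteryID lotteryID winnerID k out) := by unfold Spec_maximizeLotteryID; infer_instance

-- ===== CLAIM (what is proved, stated in full; the proofs are below) =====
def Claim_equal_maximizeLotteryID : Prop := ∀ (lotteryID : String) (winnerID : String) (k : Int), Dom_maximizeLotteryID lotteryID winnerID k → Pre_maximizeLotteryID lotteryID winnerID k → Spec_maximizeLotteryID lotteryID winnerID k (maximizeLotteryID lotteryID winnerID k)

-- ===== LEMMAS AND PROOFS =====

-- "processed" predicates for the three nested loops of A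
def pvPO (a : Nat) : Nat → Nat → Nat → Bool := fun i _ _ => decide (i ≤ a)
def pvPM (I b : Nat) : Nat → Nat → Nat → Bool := fun i j _ => decide (i < I ∨ (i = I ∧ j ≤ b))
def pvPR (I J c : Nat) : Nat → Nat → Nat → Bool :=
  fun i j r => decide (i < I ∨ (i = I ∧ (j < J ∨ (j = J ∧ r < c))))

-- loop invariant: the table has the right shape; processed entries hold pvSolve, the rest 0
def pvInv (xs ys : List Char) (K : Nat) (P : Nat → Nat → Nat → Bool)
    (dp : List (List (List Int))) : Prop :=
  dp.length = xs.length + 1 ∧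
  (∀ i, i ≤ xs.length → (dp.getD i []).length = ys.length + 1) ∧
  (∀ i j, i ≤ xs.length → j ≤ ys.length → ((dp.getD i []).getD j []).length = K + 1) ∧
  (∀ i j r, i ≤ xs.length → j ≤ ys.length → r ≤ K →
    pvGet3 dp i j r = if P i j r then pvSolve xs ys i j r else 0)

theorem pv_getD_set_self {α : Type} (l : List α) (i : Nat) (v d : α) (h : i < l.length) :
    (l.set i v).getD i d = v := by
  simp [List.getD, h]

theorem pv_getD_set_ne {α : Type} (l : List α) (i i' : Nat) (v d : α) (h : i ≠ i') :
    (l.set i v).getD i' d = l.getD i' d := by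
  simp [List.getD, List.getElem?_set_ne h]

theorem pv_getD_replicate {α : Type} (n i : Nat) (x d : α) :
    (List.replicate n x).getD i d = if i < n then x else d := by
  by_cases h : i < n <;> simp [List.getD, h]

theorem pvSet3_length (dp : List (List (List Int))) (i j r : Nat) (v : Int) :
    (pvSet3 dp i j r v).length = dp.length := by
  simp [pvSet3]

theorem pvSet3_getD_length (dp : List (List (List Int))) (i j r : Nat) (v : Int) (i' : Nat) :
    ((pvSet3 dp i j r v).getD i' []).length = (dp.getD i' []).length := by
  by_cases hii : i = i'
  · subst hii
    by_cases h : i < dp.length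
    · rw [pvSet3, pv_getD_set_self _ _ _ _ h]; simp
    · rw [pvSet3, List.set_eq_of_length_le (by omega)]
  · rw [pvSet3, pv_getD_set_ne _ _ _ _ _ hii]

theorem pvSet3_getD_getD_length (dp : List (List (List Int))) (i j r : Nat) (v : Int)
    (i' j' : Nat) :
    (((pvSet3 dp i j r v).getD i' []).getD j' []).length = ((dp.getD i' []).getD j' []).length := by
  by_cases hii : i = i'
  · subst hii
    by_cases h : i < dp.length
    · rw [pvSet3, pv_getD_set_self _ _ _ _ h]
      by_cases hjj : j = j'
      · subst hjj
        by_cases h2 : j < (dp.getD i []).length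
        · rw [pv_getD_set_self _ _ _ _ h2]; simp
        · rw [List.set_eq_of_length_le (by omega)]
      · rw [pv_getD_set_ne _ _ _ _ _ hjj]
    · rw [pvSet3, List.set_eq_of_length_le (by omega)]
  · rw [pvSet3, pv_getD_set_ne _ _ _ _ _ hii]

theorem pvGet3_pvSet3_self (dp : List (List (List Int))) (i j r : Nat) (v : Int)
    (h1 : i < dp.length) (h2 : j < (dp.getD i []).length)
    (h3 : r < ((dp.getD i []).getD j []).length) :
    pvGet3 (pvSet3 dp i j r v) i j r = v := by
  rw [pvGet3, pvSet3, pv_getD_set_self _ _ _ _ h1, pv_getD_set_self _ _ _ _ h2,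
      pv_getD_set_self _ _ _ _ h3]

theorem pvGet3_pvSet3_ne (dp : List (List (List Int))) (i j r : Nat) (v : Int)
    (i' j' r' : Nat) (h : ¬(i' = i ∧ j' = j ∧ r' = r)) :
    pvGet3 (pvSet3 dp i j r v) i' j' r' = pvGet3 dp i' j' r' := by
  by_cases hii : i = i'
  · subst hii
    by_cases hl : i < dp.length
    · rw [pvGet3, pvSet3, pv_getD_set_self _ _ _ _ hl, pvGet3]
      by_cases hjj : j = j'
      · subst hjj
        by_cases hl2 : j < (dp.getD i []).length
        · rw [pv_getD_set_self _ _ _ _ hl2]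
          have hrr : r ≠ r' := by tauto
          rw [pv_getD_set_ne _ _ _ _ _ hrr]
        · rw [List.set_eq_of_length_le (by omega)]
      · rw [pv_getD_set_ne _ _ _ _ _ hjj]
    · rw [pvSet3, List.set_eq_of_length_le (by omega)]
  · rw [pvGet3, pvSet3, pv_getD_set_ne _ _ _ _ _ hii, pvGet3]

theorem pvGet3_replicate (a b c i j r : Nat) :
    pvGet3 (List.replicate a (List.replicate b (List.replicate c (0 : Int)))) i j r = 0 := by
  rw [pvGet3, pv_getD_replicate]
  split_ifs with h1
  · rw [pv_getD_replicate]
    split_ifs with h2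
    · rw [pv_getD_replicate]; split_ifs <;> rfl
    · rfl
  · rfl

theorem pvSolve_zero_left (xs ys : List Char) (j r : Nat) : pvSolve xs ys 0 j r = 0 := by
  simp [pvSolve]

theorem pvSolve_zero_right (xs ys : List Char) (i r : Nat) : pvSolve xs ys i 0 r = 0 := by
  cases i <;> simp [pvSolve]

theorem pvSolve_pos (xs ys : List Char) (i j r : Nat) (hi : 1 ≤ i) (hj : 1 ≤ j) :
    pvSolve xs ys i j r =
      (let best := max (pvSolve xs ys (i-1) j r) (pvSolve xs ys i (j-1) r)
       let best := if xs.getD (i-1) ' ' == ys.getD (j-1) ' ' then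
           max best (pvSolve xs ys (i-1) (j-1) r + 1)
         else best
       if decide (0 < r) && pvCanShift (xs.getD (i-1) ' ') (ys.getD (j-1) ' ') then
         max best (pvSolve xs ys (i-1) (j-1) (r-1) + 1)
       else best) := by
  obtain ⟨i', rfl⟩ : ∃ i', i = i' + 1 := ⟨i - 1, by omega⟩
  obtain ⟨j', rfl⟩ : ∃ j', j = j' + 1 := ⟨j - 1, by omega⟩
  simp [pvSolve]

theorem pvInv_mono (xs ys : List Char) (K : Nat) (P Q : Nat → Nat → Nat → Bool)
    (dp : List (List (List Int))) (h : pvInv xs ys K P dp)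
    (hpq : ∀ i j r, i ≤ xs.length → j ≤ ys.length → r ≤ K →
      (if P i j r then pvSolve xs ys i j r else 0) = (if Q i j r then pvSolve xs ys i j r else 0)) :
    pvInv xs ys K Q dp := by
  obtain ⟨a, b, c, d⟩ := h
  exact ⟨a, b, c, fun i j r h1 h2 h3 => (d i j r h1 h2 h3).trans (hpq i j r h1 h2 h3)⟩

theorem pvInv_bodyR (xs ys : List Char) (K i j r : Nat) (dp : List (List (List Int)))
    (hi : 1 ≤ i) (him : i ≤ xs.length) (hj : 1 ≤ j) (hjn : j ≤ ys.length) (hr : r ≤ K)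
    (h : pvInv xs ys K (pvPR i j r) dp) :
    pvInv xs ys K (pvPR i j (r+1)) (pvBodyR xs ys i j dp r) := by
  obtain ⟨hL, hRow, hCell, hVal⟩ := h
  have hbi : i < dp.length := by rw [hL]; omega
  have hbj : j < (dp.getD i []).length := by rw [hRow i him]; omega
  have hbr : r < ((dp.getD i []).getD j []).length := by rw [hCell i j him hjn]; omega
  -- lengths preserved
  have len1 : (pvBodyR xs ys i j dp r).length = dp.length := by
    simp only [pvBodyR]; split_ifs <;> simp only [pvSet3_length]
  have len2 : ∀ i', ((pvBodyR xs ys i j dp r).getD i' []).length = (dp.getD i' []).length := by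
    intro i'; simp only [pvBodyR]; split_ifs <;> simp only [pvSet3_getD_length]
  have len3 : ∀ i' j', (((pvBodyR xs ys i j dp r).getD i' []).getD j' []).length
      = ((dp.getD i' []).getD j' []).length := by
    intro i' j'; simp only [pvBodyR]; split_ifs <;> simp only [pvSet3_getD_getD_length]
  -- untouched entries keep their value
  have hne : ∀ i' j' r', ¬(i' = i ∧ j' = j ∧ r' = r) →
      pvGet3 (pvBodyR xs ys i j dp r) i' j' r' = pvGet3 dp i' j' r' := by
    intro i' j' r' hx
    simp only [pvBodyR]
    split_ifs <;>
      simp only [pvGet3_pvSet3_ne _ _ _ _ _ _ _ _ hx]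
  -- the written entry gets pvSolve i j r
  have ht1 : pvPR i j r (i-1) j r = true := by
    simp only [pvPR, decide_eq_true_eq, true_and, and_true]; omega
  have ht2 : pvPR i j r i (j-1) r = true := by
    simp only [pvPR, decide_eq_true_eq, true_and, and_true]; omega
  have ht3 : pvPR i j r (i-1) (j-1) r = true := by
    simp only [pvPR, decide_eq_true_eq, true_and, and_true]; omega
  have ht4 : pvPR i j r (i-1) (j-1) (r-1) = true := by
    simp only [pvPR, decide_eq_true_eq, true_and, and_true]; omega
  have hget1 : pvGet3 dp (i-1) j r = pvSolve xs ys (i-1) j r := by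
    rw [hVal (i-1) j r (by omega) hjn hr, if_pos ht1]
  have hget2 : pvGet3 dp i (j-1) r = pvSolve xs ys i (j-1) r := by
    rw [hVal i (j-1) r him (by omega) hr, if_pos ht2]
  have hget3 : pvGet3 dp (i-1) (j-1) r = pvSolve xs ys (i-1) (j-1) r := by
    rw [hVal (i-1) (j-1) r (by omega) (by omega) hr, if_pos ht3]
  have hget4 : pvGet3 dp (i-1) (j-1) (r-1) = pvSolve xs ys (i-1) (j-1) (r-1) := by
    rw [hVal (i-1) (j-1) (r-1) (by omega) (by omega) (by omega), if_pos ht4]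
  have hd2 : ¬((i:Nat) - 1 = i ∧ (j:Nat) - 1 = j ∧ r = r) := by omega
  have hd3 : ¬((i:Nat) - 1 = i ∧ (j:Nat) - 1 = j ∧ (r:Nat) - 1 = r) := by omega
  have hself : pvGet3 (pvBodyR xs ys i j dp r) i j r = pvSolve xs ys i j r := by
    rw [pvSolve_pos xs ys i j r hi hj]
    simp only [pvBodyR]
    set v1 := max (pvGet3 dp (i-1) j r) (pvGet3 dp i (j-1) r) with hv1
    have hv1' : v1 = max (pvSolve xs ys (i-1) j r) (pvSolve xs ys i (j-1) r) := by
      rw [hv1, hget1, hget2]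
    have e1 : pvGet3 (pvSet3 dp i j r v1) i j r = v1 :=
      pvGet3_pvSet3_self dp i j r v1 hbi hbj hbr
    have e2 : pvGet3 (pvSet3 dp i j r v1) (i-1) (j-1) r = pvSolve xs ys (i-1) (j-1) r := by
      rw [pvGet3_pvSet3_ne _ _ _ _ _ _ _ _ hd2, hget3]
    have e3 : pvGet3 (pvSet3 dp i j r v1) (i-1) (j-1) (r-1) = pvSolve xs ys (i-1) (j-1) (r-1) := by
      rw [pvGet3_pvSet3_ne _ _ _ _ _ _ _ _ hd3, hget4]
    by_cases hA : (xs.getD (i-1) ' ' == ys.getD (j-1) ' ') = true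
    · by_cases hB : (decide (0 < r) && pvCanShift (xs.getD (i-1) ' ') (ys.getD (j-1) ' ')) = true
      · rw [if_pos hA, if_pos hB, e1, e2]
        set v2 := max v1 (pvSolve xs ys (i-1) (j-1) r + 1) with hv2
        have f1 : pvGet3 (pvSet3 (pvSet3 dp i j r v1) i j r v2) i j r = v2 := by
          apply pvGet3_pvSet3_self
          · rw [pvSet3_length]; exact hbi
          · rw [pvSet3_getD_length]; exact hbj
          · rw [pvSet3_getD_getD_length]; exact hbr
        have f2 : pvGet3 (pvSet3 (pvSet3 dp i j r v1) i j r v2) (i-1) (j-1) (r-1)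
            = pvSolve xs ys (i-1) (j-1) (r-1) := by
          rw [pvGet3_pvSet3_ne _ _ _ _ _ _ _ _ hd3, e3]
        rw [f1, f2]
        have g1 : pvGet3 (pvSet3 (pvSet3 (pvSet3 dp i j r v1) i j r v2) i j r
            (max v2 (pvSolve xs ys (i-1) (j-1) (r-1) + 1))) i j r
            = max v2 (pvSolve xs ys (i-1) (j-1) (r-1) + 1) := by
          apply pvGet3_pvSet3_self
          · rw [pvSet3_length, pvSet3_length]; exact hbi
          · rw [pvSet3_getD_length, pvSet3_getD_length]; exact hbj
          · rw [pvSet3_getD_getD_length, pvSet3_getD_getD_length]; exact hbr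
        rw [g1, hv2, hv1']
        rw [if_pos hB, if_pos hA]
      · rw [if_pos hA, if_neg hB, e1, e2]
        have f1 : pvGet3 (pvSet3 (pvSet3 dp i j r v1) i j r
            (max v1 (pvSolve xs ys (i-1) (j-1) r + 1))) i j r
            = max v1 (pvSolve xs ys (i-1) (j-1) r + 1) := by
          apply pvGet3_pvSet3_self
          · rw [pvSet3_length]; exact hbi
          · rw [pvSet3_getD_length]; exact hbj
          · rw [pvSet3_getD_getD_length]; exact hbr
        rw [f1, hv1']
        rw [if_neg hB, if_pos hA]
    · by_cases hB : (decide (0 < r) && pvCanShift (xs.getD (i-1) ' ') (ys.getD (j-1) ' ')) = true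
      · rw [if_neg hA, if_pos hB, e1, e3]
        have f1 : pvGet3 (pvSet3 (pvSet3 dp i j r v1) i j r
            (max v1 (pvSolve xs ys (i-1) (j-1) (r-1) + 1))) i j r
            = max v1 (pvSolve xs ys (i-1) (j-1) (r-1) + 1) := by
          apply pvGet3_pvSet3_self
          · rw [pvSet3_length]; exact hbi
          · rw [pvSet3_getD_length]; exact hbj
          · rw [pvSet3_getD_getD_length]; exact hbr
        rw [f1, hv1']
        rw [if_pos hB, if_neg hA]
      · rw [if_neg hA, if_neg hB, e1, hv1']
        rw [if_neg hB, if_neg hA]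
  refine ⟨by rw [len1, hL], fun i' hi' => by rw [len2]; exact hRow i' hi',
    fun i' j' hi' hj' => by rw [len3]; exact hCell i' j' hi' hj', ?_⟩
  intro i' j' r' h1 h2 h3
  by_cases heq : i' = i ∧ j' = j ∧ r' = r
  · obtain ⟨rfl, rfl, rfl⟩ := heq
    rw [hself, if_pos]
    simp only [pvPR, decide_eq_true_eq, true_and, and_true]; omega
  · rw [hne _ _ _ heq, hVal _ _ _ h1 h2 h3]
    have hpq : pvPR i j (r+1) i' j' r' = pvPR i j r i' j' r' := by
      simp only [pvPR, decide_eq_decide, true_and, and_true]; omega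
    rw [hpq]

theorem pvInv_foldR (xs ys : List Char) (K i j : Nat)
    (hi : 1 ≤ i) (him : i ≤ xs.length) (hj : 1 ≤ j) (hjn : j ≤ ys.length) :
    ∀ c, c ≤ K + 1 → ∀ dp, pvInv xs ys K (pvPR i j 0) dp →
      pvInv xs ys K (pvPR i j c) ((List.range c).foldl (pvBodyR xs ys i j) dp) := by
  intro c
  induction c with
  | zero => intro _ dp h; simpa using h
  | succ c ih =>
    intro hc dp h
    rw [List.range_succ, List.foldl_append, List.foldl_cons, List.foldl_nil]
    exact pvInv_bodyR xs ys K i j c _ hi him hj hjn (by omega) (ih (by omega) dp h)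

theorem pvInv_foldJ (xs ys : List Char) (K i : Nat) (hi : 1 ≤ i) (him : i ≤ xs.length) :
    ∀ b, b ≤ ys.length → ∀ dp, pvInv xs ys K (pvPM i 0) dp →
      pvInv xs ys K (pvPM i b) ((List.range' 1 b).foldl (pvBodyJ xs ys (K+1) i) dp) := by
  intro b
  induction b with
  | zero => intro _ dp h; simpa using h
  | succ b ih =>
    intro hb dp h
    have hb1 : 1 + 1 * b = b + 1 := by omega
    have hcat : List.range' 1 (b+1) = List.range' 1 b ++ [b+1] := by
      rw [List.range'_concat, hb1]
    rw [hcat, List.foldl_append, List.foldl_cons, List.foldl_nil]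
    have h1 : pvInv xs ys K (pvPR i (b+1) 0) ((List.range' 1 b).foldl (pvBodyJ xs ys (K+1) i) dp) := by
      apply pvInv_mono xs ys K (pvPM i b) _ _ (ih (by omega) dp h)
      intro i' j' r' _ _ _
      have : pvPM i b i' j' r' = pvPR i (b+1) 0 i' j' r' := by
        simp only [pvPM, pvPR, decide_eq_decide, true_and, and_true]; omega
      rw [this]
    have h2 := pvInv_foldR xs ys K i (b+1) hi him (by omega) hb (K+1) (le_refl _) _ h1
    apply pvInv_mono xs ys K (pvPR i (b+1) (K+1)) _ _ h2
    intro i' j' r' _ _ h3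
    have : pvPR i (b+1) (K+1) i' j' r' = pvPM i (b+1) i' j' r' := by
      simp only [pvPR, pvPM, decide_eq_decide, true_and, and_true]; omega
    rw [this]

theorem pvInv_foldI (xs ys : List Char) (K : Nat) :
    ∀ a, a ≤ xs.length →
      pvInv xs ys K (pvPO a) ((List.range' 1 a).foldl (pvBodyI xs ys (K+1) ys.length)
        (List.replicate (xs.length + 1) (List.replicate (ys.length + 1) (List.replicate (K+1) (0 : Int))))) := by
  intro a
  induction a with
  | zero =>
    intro _
    refine ⟨by simp, ?_, ?_, ?_⟩
    · intro i hi
      rw [List.range'_zero, List.foldl_nil, pv_getD_replicate, if_pos (by omega)]; simp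
    · intro i j hi hj
      rw [List.range'_zero, List.foldl_nil, pv_getD_replicate, if_pos (by omega), pv_getD_replicate,
        if_pos (by omega)]; simp
    · intro i j r hi hj hr
      rw [List.range'_zero, List.foldl_nil, pvGet3_replicate]
      split_ifs with h
      · have : i = 0 := by simpa [pvPO] using h
        subst this
        rw [pvSolve_zero_left]
      · rfl
  | succ a ih =>
    intro ha
    have ha1 : 1 + 1 * a = a + 1 := by omega
    have hcat : List.range' 1 (a+1) = List.range' 1 a ++ [a+1] := by
      rw [List.range'_concat, ha1]
    rw [hcat, List.foldl_append, List.foldl_cons, List.foldl_nil]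
    have h0 : pvInv xs ys K (pvPM (a+1) 0)
        ((List.range' 1 a).foldl (pvBodyI xs ys (K+1) ys.length)
          (List.replicate (xs.length + 1) (List.replicate (ys.length + 1) (List.replicate (K+1) (0 : Int))))) := by
      apply pvInv_mono xs ys K (pvPO a) _ _ (ih (by omega))
      intro i' j' r' _ _ _
      by_cases hcase : i' = a + 1 ∧ j' = 0
      · obtain ⟨rfl, rfl⟩ := hcase
        rw [if_neg (by simp [pvPO]), if_pos (by simp [pvPM]), pvSolve_zero_right]
      · have : pvPO a i' j' r' = pvPM (a+1) 0 i' j' r' := by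
          simp only [pvPO, pvPM, decide_eq_decide, true_and, and_true]; omega
        rw [this]
    have h1 := pvInv_foldJ xs ys K (a+1) (by omega) ha ys.length (le_refl _) _ h0
    apply pvInv_mono xs ys K (pvPM (a+1) ys.length) _ _ h1
    intro i' j' r' _ hj' _
    have : pvPM (a+1) ys.length i' j' r' = pvPO (a+1) i' j' r' := by
      simp only [pvPM, pvPO, decide_eq_decide, true_and, and_true]; omega
    rw [this]

theorem maximizeLotteryID_spec : Claim_equal_maximizeLotteryID := by
  intro l w k hdom hpre
  unfold Pre_maximizeLotteryID at hpre
  unfold Spec_maximizeLotteryID maximizeLotteryID maximizeLotteryID_alt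
  have hk : (k + 1).toNat = k.toNat + 1 := by omega
  simp only [hk]
  obtain ⟨_, _, _, hVal⟩ := pvInv_foldI l.toList w.toList k.toNat l.toList.length (le_refl _)
  rw [hVal l.toList.length w.toList.length k.toNat (le_refl _) (le_refl _) (le_refl _),
    if_pos (by simp [pvPO])]
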